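-- pv_equiv track=rewrite | github.com/smith-nathanh/twentyone | twentyone/mc_main.py | adjust_count
-- ===== SOURCE A (Python) =====
-- def adjust_count(cards):
--     count = 0
--     for card in cards:
--         if card == 1 or card == 10:
--             count -= 1
--         elif 2 <= card <= 6:
--             count += 1
--     return count
-- ===== SOURCE B (Python) =====
-- def adjust_count(cards):
--     tally = {}
--     for c in cards:
--         tally[c] = tally.get(c, 0) + 1
--     total = 0
--     for value, n in tally.items():
--         if value == 1 or value == 10:
--             total -= n
--         elif 2 <= value <= 6:
--             total += n
--     return total
-- ===== Notes on version B (the rewrite author's own statement) =====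
-- stated objective: alternative
-- what changed: B first builds a frequency tally (a dict counting occurrences) and then accumulates weighted contributions over the unique (value, count) pairs, instead of A's per-card branching accumulator loop.
import Mathlib
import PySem

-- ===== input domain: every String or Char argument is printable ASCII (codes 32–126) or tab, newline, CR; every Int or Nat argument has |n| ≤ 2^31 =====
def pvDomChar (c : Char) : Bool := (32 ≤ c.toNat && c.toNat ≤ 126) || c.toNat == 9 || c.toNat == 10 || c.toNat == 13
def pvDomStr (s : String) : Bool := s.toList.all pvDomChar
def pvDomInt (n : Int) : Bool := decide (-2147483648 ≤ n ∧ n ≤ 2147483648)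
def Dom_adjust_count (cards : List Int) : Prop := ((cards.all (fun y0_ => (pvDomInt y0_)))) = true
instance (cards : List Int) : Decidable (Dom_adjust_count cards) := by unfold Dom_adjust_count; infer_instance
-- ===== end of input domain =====

-- B builds a frequency tally first and sums weighted contributions over unique (value, count) pairs (objective: alternative).

-- ===== PORT A =====
def adjust_count (cards : List Int) : Int :=
  cards.foldl (fun count card =>
    if card == 1 || card == 10 then count - 1
    else if 2 ≤ card ∧ card ≤ 6 then count + 1
    else count) 0

-- ===== PORT B =====
def adjust_count_alt (cards : List Int) : Int :=
  (cards.foldl (fun d c => d.insert c (d.getD c 0 + 1)) PySem.Dict.empty).items.foldl (fun total kv =>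
    if kv.1 == 1 || kv.1 == 10 then total - kv.2
    else if 2 ≤ kv.1 ∧ kv.1 ≤ 6 then total + kv.2
    else total) 0

-- ===== PRECONDITION & SPEC =====
def Spec_adjust_count (cards : List Int) (out : Int) : Prop := out = adjust_count_alt cards
instance (cards : List Int) (out : Int) : Decidable (Spec_adjust_count cards out) := by unfold Spec_adjust_count; infer_instance

-- ===== CLAIM =====
def Claim_equal_adjust_count : Prop := ∀ (cards : List Int), Dom_adjust_count cards → Spec_adjust_count cards (adjust_count cards)

-- ===== LEMMAS AND PROOFS =====
-- the per-card weight shared by both programs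
def acWeight (c : Int) : Int :=
  if c == 1 || c == 10 then -1 else if 2 ≤ c ∧ c ≤ 6 then 1 else 0

theorem acA_foldl_eq (cards : List Int) (acc : Int) :
    cards.foldl (fun count card =>
      if card == 1 || card == 10 then count - 1
      else if 2 ≤ card ∧ card ≤ 6 then count + 1
      else count) acc = acc + (cards.map acWeight).sum := by
  induction cards generalizing acc with
  | nil => simp
  | cons c cs ih =>
    simp only [List.foldl_cons, List.map_cons, List.sum_cons, ih, acWeight]
    split_ifs <;> ring

theorem acB_foldl_eq (pairs : List (Int × Int)) (acc : Int) :
    pairs.foldl (fun total kv =>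
      if kv.1 == 1 || kv.1 == 10 then total - kv.2
      else if 2 ≤ kv.1 ∧ kv.1 ≤ 6 then total + kv.2
      else total) acc = acc + (pairs.map (fun kv => acWeight kv.1 * kv.2)).sum := by
  induction pairs generalizing acc with
  | nil => simp
  | cons p ps ih =>
    simp only [List.foldl_cons, List.map_cons, List.sum_cons, ih, acWeight]
    split_ifs <;> ring

theorem acSum_ite_self (f : Int → Int) (S : List Int) (c : Int)
    (hnd : S.Nodup) (hc : c ∈ S) :
    (S.map (fun k => if k = c then f k else 0)).sum = f c := by
  induction S with
  | nil => cases hc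
  | cons s ss ih =>
    obtain ⟨hns, hnd'⟩ := List.nodup_cons.mp hnd
    simp only [List.map_cons, List.sum_cons]
    rcases List.mem_cons.mp hc with h | h
    · subst h
      rw [if_pos rfl, List.sum_eq_zero, add_zero]
      intro x hx
      rcases List.mem_map.mp hx with ⟨k, hk, rfl⟩
      exact if_neg fun e => hns (by rw [← e]; exact hk)
    · rw [if_neg fun e => hns (by rw [e]; exact h), ih hnd' h, zero_add]

theorem acSum_dedup (f : Int → Int) (xs S : List Int)
    (hnd : S.Nodup) (hsub : ∀ x ∈ xs, x ∈ S) :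
    (S.map (fun k => f k * (xs.count k : Int))).sum = (xs.map f).sum := by
  induction xs with
  | nil => simp
  | cons c cs ih =>
    have hsplit : ∀ k : Int, f k * ((c :: cs).count k : Int)
        = f k * (cs.count k : Int) + (if k = c then f k else 0) := by
      intro k
      by_cases h : k = c
      · subst h; simp; ring
      · simp [List.count_cons, h]
        exact Or.inl fun e => h e.symm
    calc (S.map (fun k => f k * ((c :: cs).count k : Int))).sum
        = (S.map (fun k => f k * (cs.count k : Int) + (if k = c then f k else 0))).sum := by
          simp only [hsplit]
      _ = (S.map (fun k => f k * (cs.count k : Int))).sum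
            + (S.map (fun k => if k = c then f k else 0)).sum := by
          rw [← List.sum_map_add]
      _ = (cs.map f).sum + f c := by
          rw [ih (fun x hx => hsub x (List.mem_cons_of_mem c hx)),
            acSum_ite_self f S c hnd (hsub c (List.mem_cons_self))]
      _ = ((c :: cs).map f).sum := by simp; ring

-- ===== VERDICT =====
theorem adjust_count_spec : Claim_equal_adjust_count := by
  intro cards _
  unfold Spec_adjust_count adjust_count adjust_count_alt
  rw [PySem.Dict.foldl_insert_getD_add_one_eq_counter, PySem.Dict.items_counter,
    acA_foldl_eq, acB_foldl_eq, List.map_map]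
  simp only [Function.comp_def]
  rw [acSum_dedup acWeight cards (PySem.Set.ofList cards)
    (PySem.Set.nodup_ofList cards) (fun x hx => (PySem.Set.mem_ofList cards x).mpr hx)]
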